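-- pv_equiv track=rewrite | github.com/romeroyakovlev/ii | api/splitparser.py | _btn
-- ===== SOURCE A (Python) =====
-- def _btn(s,tag):
--     k = s.split(tag)
--     buf = k[0]
--     for x in k[1:]:
--         endl = x.split(' ',1)
--         xl = None
--         for eol in '.,:':
--             if endl[0].endswith(eol):
--                 xl = _settag(endl[0][:-1],tag) + eol + ' ' + ' '.join(endl[1:])
--         if xl is None: xl = _settag(endl[0],tag) + ' ' + ' '.join(endl[1:])
--         buf += xl
--     return buf
--
-- def _settag(s,tag):
--     if tag == 'http://' or tag == 'https://':
--         return u'<a href="%s%s"><i class="fa fa-%s"></i>%s%s</a>' % (tag,s,'link' if tag == 'http://' else 'lock', tag,s)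
--     elif tag == 'ii://':
--         endl = s.rsplit('.',1)
--         if len(endl)>1 and endl[1].isdigit(): icon = 'plane'
--         else: icon = 'envelope'
--         return u'<a href="/%s"><span class="radius label success"><i class="fa fa-%s"></i> %s</span></a>' % (s,icon,s)
-- ===== SOURCE B (Python) =====
-- def _btn(s, tag):
--     # single left-to-right character scan with a two-state machine
--     # (copy mode / word-collecting mode after a tag); no split() at all
--     n, m = len(s), len(tag)
--     out = []
--     word = None                 # None = copy mode; list = collecting the word after a tag
--     i = 0
--     def emit(w):
--         w = ''.join(w)
--         if w[-1:] in ('.', ',', ':'):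
--             return _settag(w[:-1], tag) + w[-1] + ' '
--         return _settag(w, tag) + ' '
--     while i < n:
--         if m and s.startswith(tag, i):
--             if word is not None:
--                 out.append(emit(word))
--             word = []
--             i += m
--         elif word is not None and s[i] == ' ':
--             out.append(emit(word))
--             word = None
--             i += 1
--         else:
--             (out if word is None else word).append(s[i])
--             i += 1
--     if word is not None:
--         out.append(emit(word))
--     return ''.join(out)
--
-- def _settag(s, tag):
--     if tag == 'http://' or tag == 'https://':
--         return u'<a href="%s%s"><i class="fa fa-%s"></i>%s%s</a>' % (tag,s,'link' if tag == 'http://' else 'lock', tag,s)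
--     elif tag == 'ii://':
--         endl = s.rsplit('.',1)
--         if len(endl)>1 and endl[1].isdigit(): icon = 'plane'
--         else: icon = 'envelope'
--         return u'<a href="/%s"><span class="radius label success"><i class="fa fa-%s"></i> %s</span></a>' % (s,icon,s)
-- ===== Notes on version B (the rewrite author's own statement) =====
-- stated objective: alternative
-- what changed: Replaces A's split(tag) + per-segment split(' ',1) + endswith-sentinel pipeline with a single character-level two-state scan (copy mode vs word-collecting mode after a tag) that emits output pieces as it walks the string once; _settag is unchanged.
import Mathlib
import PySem

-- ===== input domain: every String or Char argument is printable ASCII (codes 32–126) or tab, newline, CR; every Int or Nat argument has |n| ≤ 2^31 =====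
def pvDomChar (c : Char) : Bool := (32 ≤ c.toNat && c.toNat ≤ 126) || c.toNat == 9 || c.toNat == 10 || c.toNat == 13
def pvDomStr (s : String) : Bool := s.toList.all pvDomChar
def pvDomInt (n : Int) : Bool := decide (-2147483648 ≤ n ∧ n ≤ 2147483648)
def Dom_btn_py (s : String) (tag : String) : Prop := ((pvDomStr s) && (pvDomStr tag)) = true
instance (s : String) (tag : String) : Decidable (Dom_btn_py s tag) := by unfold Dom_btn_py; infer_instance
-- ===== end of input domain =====

-- B replaces A's split(tag)/split(' ',1)/endswith-sentinel pipeline by a single character-level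
-- two-state scan (copy mode / word-collecting mode); return values proved equal on Pre_.

-- ===== PORT A =====
-- _settag, shared verbatim by Source A and Source B (B's Python keeps it unchanged), on char lists.
-- s.rsplit('.', 1) is ported exactly via rfind: the second piece exists iff '.' occurs and is s[r+1:].
def settagL (s tag : List Char) : List Char :=
  if tag = "http://".toList ∨ tag = "https://".toList then
    "<a href=\"".toList ++ tag ++ s ++ "\"><i class=\"fa fa-".toList ++
      (if tag = "http://".toList then "link".toList else "lock".toList) ++
      "\"></i>".toList ++ tag ++ s ++ "</a>".toList
  else if tag = "ii://".toList then
    let r := PySem.Chars.rfind s ['.']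
    let icon := if 0 ≤ r ∧ PySem.Chars.strIsdigit (s.drop (r.toNat + 1)) then "plane".toList
                else "envelope".toList
    "<a href=\"/".toList ++ s ++ "\"><span class=\"radius label success\"><i class=\"fa fa-".toList ++
      icon ++ "\"></i> ".toList ++ s ++ "</span></a>".toList
  else []   -- Python returns None here and _btn then raises TypeError; excluded by Pre_

def btnAL (cs ct : List Char) : List Char :=
  match PySem.Chars.split? cs ct with
  | none => cs   -- Python raises ValueError on an empty separator; excluded by Pre_
  | some k =>
    k.tail.foldl (fun buf x =>
      let endl := PySem.Chars.splitOnMax x [' '] 1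
      let xl : Option (List Char) :=
        ['.', ',', ':'].foldl (fun xl eol =>
          if PySem.Chars.endswith (endl.headD []) [eol] then
            some (settagL (endl.headD []).dropLast ct ++ [eol] ++ [' '] ++
                  PySem.Chars.join [' '] endl.tail)
          else xl) none
      -- 'if xl is None: xl = ...' then 'buf += xl'
      let xl2 : List Char :=
        match xl with
        | none => settagL (endl.headD []) ct ++ [' '] ++ PySem.Chars.join [' '] endl.tail
        | some v => v
      buf ++ xl2) (k.headD [])

def btn_py (s : String) (tag : String) : String :=
  String.ofList (btnAL s.toList tag.toList)

-- ===== PORT B =====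
-- Source B's emit helper: w[-1:] in ('.', ',', ':') is the last-character test
def emitB (tag w : List Char) : List Char :=
  match w.getLast? with
  | some c =>
    if c = '.' ∨ c = ',' ∨ c = ':' then settagL w.dropLast tag ++ [c] ++ [' ']
    else settagL w tag ++ [' ']
  | none => settagL w tag ++ [' ']

-- Source B's while-loop: one pass over the characters, state = the word being collected (or none);
-- output pieces appended in order (''.join(out) = the concatenation built here)
def btnBrun (tag : List Char) (l : List Char) (word : Option (List Char)) : List Char :=
  match l with
  | [] => match word with | none => [] | some w => emitB tag w
  | c :: rest =>
    if h : tag ≠ [] ∧ tag.isPrefixOf (c :: rest) then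
      (match word with | some w => emitB tag w | none => ([] : List Char)) ++
        btnBrun tag ((c :: rest).drop tag.length) (some [])
    else
      match word with
      | some w =>
        if c = ' ' then emitB tag w ++ btnBrun tag rest none
        else btnBrun tag rest (some (w ++ [c]))
      | none => c :: btnBrun tag rest none
termination_by l.length
decreasing_by
  all_goals simp only [List.length_drop, List.length_cons]
  all_goals try omega
  all_goals
    have h1 : 1 ≤ tag.length := List.length_pos_iff.mpr h.1
    omega

def btn_py_alt (s : String) (tag : String) : String :=
  String.ofList (btnBrun tag.toList s.toList none)

-- ===== PRECONDITION & SPEC =====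
-- Pre_ excludes exactly the inputs where the Python A raises: an empty tag (ValueError from
-- s.split('')), and a tag other than 'http://'/'https://'/'ii://' that occurs in s (_settag
-- returns None and the concatenation raises TypeError).
def Pre_btn_py (s : String) (tag : String) : Prop :=
  tag ≠ "" ∧ (tag = "http://" ∨ tag = "https://" ∨ tag = "ii://" ∨ PySem.Str.isIn tag s = false)
instance (s : String) (tag : String) : Decidable (Pre_btn_py s tag) := by
  unfold Pre_btn_py; infer_instance

def pvWitness_btn_py : String × String := ("go http://a.b now, see http://c", "http://")

def Spec_btn_py (s : String) (tag : String) (out : String) : Prop := out = btn_py_alt s tag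
instance (s : String) (tag : String) (out : String) : Decidable (Spec_btn_py s tag out) := by
  unfold Spec_btn_py; infer_instance

-- ===== CLAIM (what is proved, stated in full; the proofs are below) =====
def Claim_equal_btn_py : Prop := ∀ (s : String) (tag : String),
  Dom_btn_py s tag → Pre_btn_py s tag → Spec_btn_py s tag (btn_py s tag)

-- ===== LEMMAS AND PROOFS =====

-- prepend to the first piece (the shape splitOn.go's accumulator produces)
def modHead (p : List Char) : List (List Char) → List (List Char)
  | [] => [p]
  | h :: t => (p ++ h) :: t

theorem modHead_modHead (p q : List Char) (xs : List (List Char)) :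
    modHead p (modHead q xs) = modHead (p ++ q) xs := by
  cases xs <;> simp [modHead]

theorem modHead_nil {xs : List (List Char)} (h : xs ≠ []) : modHead [] xs = xs := by
  cases xs with
  | nil => exact absurd rfl h
  | cons a t => simp [modHead]

theorem splitOn_go_ne_nil (sep : List Char) :
    ∀ fuel l cur acc, PySem.Chars.splitOn.go sep fuel l cur acc ≠ [] := by
  intro fuel
  induction fuel with
  | zero => intro l cur acc; rw [PySem.Chars.splitOn.go] <;> simp
  | succ f ih =>
    intro l cur acc
    cases l with
    | nil => rw [PySem.Chars.splitOn.go] <;> simp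
    | cons c rest =>
      rw [PySem.Chars.splitOn.go]
      split_ifs <;> apply ih

theorem splitOn_ne_nil (l sep : List Char) : PySem.Chars.splitOn l sep ≠ [] := by
  rw [PySem.Chars.splitOn]; exact splitOn_go_ne_nil sep _ l [] []

theorem splitOn_nil (sep : List Char) : PySem.Chars.splitOn [] sep = [[]] := by
  rw [PySem.Chars.splitOn, PySem.Chars.splitOn.go] <;> simp

-- ---- find: recursive characterisation from the library spec lemmas ----
theorem find_nil' {sep : List Char} (h : sep ≠ []) : PySem.Chars.find [] sep = -1 := by
  rw [PySem.Chars.find_eq_neg_one_iff]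
  simp [List.infix_nil, h]

theorem find_zero_of_prefix {l sep : List Char} (h : sep <+: l) :
    PySem.Chars.find l sep = 0 := by
  have h0 : 0 ≤ PySem.Chars.find l sep := by
    rw [PySem.Chars.find_nonneg_iff]; exact h.isInfix
  obtain ⟨-, hmin⟩ := PySem.Chars.find_spec h0
  by_contra hne
  have hpos : 0 < (PySem.Chars.find l sep).toNat := by omega
  exact hmin 0 hpos (by simpa using h)

theorem find_cons_of_not_prefix {c : Char} {rest sep : List Char}
    (hp : ¬ sep <+: (c :: rest)) :
    PySem.Chars.find (c :: rest) sep =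
      if PySem.Chars.find rest sep < 0 then -1 else PySem.Chars.find rest sep + 1 := by
  by_cases hr : PySem.Chars.find rest sep < 0
  · have hr' : ¬ sep <:+: rest := by
      rw [← PySem.Chars.find_eq_neg_one_iff]
      have := PySem.Chars.neg_one_le_find rest sep; omega
    rw [if_pos hr, PySem.Chars.find_eq_neg_one_iff]
    intro hinf
    rcases List.infix_cons_iff.mp hinf with h | h
    · exact hp h
    · exact hr' h
  · rw [if_neg hr]
    have hm0 : 0 ≤ PySem.Chars.find rest sep := by
      have := PySem.Chars.neg_one_le_find rest sep; omega
    obtain ⟨hocc, hmin⟩ := PySem.Chars.find_spec hm0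
    have hocc' : sep <+: List.drop ((PySem.Chars.find rest sep).toNat + 1) (c :: rest) := by
      simpa [List.drop_succ_cons] using hocc
    have h0 : 0 ≤ PySem.Chars.find (c :: rest) sep := by
      rw [PySem.Chars.find_nonneg_iff]
      have hisin := (PySem.Chars.exists_prefix_drop_iff_isIn sep (c :: rest)).mp
        ⟨(PySem.Chars.find rest sep).toNat + 1, hocc'⟩
      rwa [PySem.Chars.isIn_iff_infix] at hisin
    obtain ⟨kocc, kmin⟩ := PySem.Chars.find_spec h0
    have hk0 : (PySem.Chars.find (c :: rest) sep).toNat ≠ 0 := by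
      intro h; exact hp (by simpa [h] using kocc)
    have hkle : (PySem.Chars.find (c :: rest) sep).toNat ≤ (PySem.Chars.find rest sep).toNat + 1 := by
      by_contra hgt
      exact kmin _ (by omega) hocc'
    have hmk : (PySem.Chars.find rest sep).toNat ≤ (PySem.Chars.find (c :: rest) sep).toNat - 1 := by
      by_contra hgt
      have hocc2 : sep <+: List.drop ((PySem.Chars.find (c :: rest) sep).toNat - 1) rest := by
        have hk := kocc
        rwa [show (PySem.Chars.find (c :: rest) sep).toNat =
          ((PySem.Chars.find (c :: rest) sep).toNat - 1) + 1 by omega, List.drop_succ_cons] at hk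
      exact hmin _ (by omega) hocc2
    omega

-- ---- splitOn: go characterisation ----
theorem splitOn_go_spec {sep : List Char} (hsep : sep ≠ []) :
    ∀ n (l : List Char), l.length ≤ n → ∀ fuel cur acc, l.length < fuel →
      PySem.Chars.splitOn.go sep fuel l cur acc =
        acc.reverse ++ modHead cur.reverse (PySem.Chars.splitOn l sep) := by
  have hlen : 1 ≤ sep.length := by
    cases sep with
    | nil => exact absurd rfl hsep
    | cons a t => simp
  intro n
  induction n with
  | zero =>
    intro l hl fuel cur acc hf
    have hnil : l = [] := by cases l with | nil => rfl | cons a t => simp at hl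
    subst hnil
    obtain ⟨f, rfl⟩ : ∃ f, fuel = f + 1 := ⟨fuel - 1, by omega⟩
    rw [PySem.Chars.splitOn.go, splitOn_nil] <;> simp [modHead]
  | succ n ih =>
    intro l hl fuel cur acc hf
    obtain ⟨f, rfl⟩ : ∃ f, fuel = f + 1 := ⟨fuel - 1, by omega⟩
    cases l with
    | nil => rw [PySem.Chars.splitOn.go, splitOn_nil] <;> simp [modHead]
    | cons c rest =>
      rw [PySem.Chars.splitOn.go]
      have hspl0 : PySem.Chars.splitOn (c :: rest) sep =
          PySem.Chars.splitOn.go sep ((c :: rest).length + 1) (c :: rest) [] [] := by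
        rw [PySem.Chars.splitOn]
      by_cases hp : sep.isPrefixOf (c :: rest)
      · rw [if_pos hp]
        have hdl : (List.drop sep.length (c :: rest)).length ≤ n := by
          simp only [List.length_drop, List.length_cons]
          simp only [List.length_cons] at hl
          omega
        have hdf : (List.drop sep.length (c :: rest)).length < f := by
          simp only [List.length_drop, List.length_cons]
          simp only [List.length_cons] at hf
          omega
        rw [ih _ hdl f [] (cur.reverse :: acc) hdf]
        have hspl : PySem.Chars.splitOn (c :: rest) sep =
            [] :: PySem.Chars.splitOn (List.drop sep.length (c :: rest)) sep := by
          rw [hspl0, List.length_cons, PySem.Chars.splitOn.go, if_pos hp]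
          simp only [List.reverse_nil]
          rw [ih _ hdl _ [] [[]] (by simp only [List.length_drop, List.length_cons]; omega)]
          simp [modHead_nil (splitOn_ne_nil _ _)]
        simp only [List.reverse_nil]
        rw [modHead_nil (splitOn_ne_nil _ _), hspl]
        simp [modHead]
      · rw [if_neg hp]
        have hrl : rest.length ≤ n := by simp only [List.length_cons] at hl; omega
        have hrf : rest.length < f := by simp only [List.length_cons] at hf; omega
        rw [ih rest hrl f (c :: cur) acc hrf]
        have hspl : PySem.Chars.splitOn (c :: rest) sep =
            modHead [c] (PySem.Chars.splitOn rest sep) := by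
          rw [hspl0, List.length_cons, PySem.Chars.splitOn.go, if_neg hp]
          rw [ih rest hrl _ [c] [] (by omega)]
          simp [modHead]
        rw [hspl, modHead_modHead]
        simp

theorem splitOn_cons {sep : List Char} (hsep : sep ≠ []) (c : Char) (rest : List Char) :
    PySem.Chars.splitOn (c :: rest) sep =
      if sep.isPrefixOf (c :: rest) then
        [] :: PySem.Chars.splitOn ((c :: rest).drop sep.length) sep
      else modHead [c] (PySem.Chars.splitOn rest sep) := by
  have hlen : 1 ≤ sep.length := by
    cases sep with
    | nil => exact absurd rfl hsep
    | cons a t => simp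
  rw [PySem.Chars.splitOn, List.length_cons, PySem.Chars.splitOn.go]
  by_cases hp : sep.isPrefixOf (c :: rest)
  · rw [if_pos hp, if_pos hp]
    simp only [List.reverse_nil]
    rw [splitOn_go_spec hsep (List.drop sep.length (c :: rest)).length _ le_rfl _ [] [[]]
        (by simp only [List.length_drop, List.length_cons]; omega)]
    simp [modHead_nil (splitOn_ne_nil _ _)]
  · rw [if_neg hp, if_neg hp,
      splitOn_go_spec hsep rest.length rest le_rfl _ [c] [] (by omega)]
    simp [modHead]

-- ---- splitOnMax with maxsplit 1, through find ----
theorem splitOnMax_go_zero (sep : List Char) :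
    ∀ fuel l cur acc, PySem.Chars.splitOnMax.go sep fuel 0 l cur acc =
      acc.reverse ++ [cur.reverse ++ l] := by
  intro fuel l cur acc
  cases fuel with
  | zero => rw [PySem.Chars.splitOnMax.go] <;> simp
  | succ f =>
    cases l with
    | nil => rw [PySem.Chars.splitOnMax.go] <;> simp
    | cons c rest => rw [PySem.Chars.splitOnMax.go] <;> simp

theorem splitOnMax_go_one {sep : List Char} (hsep : sep ≠ []) :
    ∀ (l : List Char) fuel cur acc, l.length < fuel →
      PySem.Chars.splitOnMax.go sep fuel 1 l cur acc =
        if PySem.Chars.find l sep < 0 then acc.reverse ++ [cur.reverse ++ l]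
        else acc.reverse ++ [cur.reverse ++ l.take (PySem.Chars.find l sep).toNat,
          l.drop ((PySem.Chars.find l sep).toNat + sep.length)] := by
  intro l
  induction l with
  | nil =>
    intro fuel cur acc hf
    obtain ⟨f, rfl⟩ : ∃ f, fuel = f + 1 := ⟨fuel - 1, by omega⟩
    rw [PySem.Chars.splitOnMax.go, if_pos (by rw [find_nil' hsep]; omega)] <;> simp
  | cons c rest ih =>
    intro fuel cur acc hf
    obtain ⟨f, rfl⟩ : ∃ f, fuel = f + 1 := ⟨fuel - 1, by omega⟩
    rw [PySem.Chars.splitOnMax.go]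
    rw [if_neg one_ne_zero]
    by_cases hp : sep.isPrefixOf (c :: rest)
    · have hpre : sep <+: (c :: rest) := List.isPrefixOf_iff_prefix.mp hp
      rw [if_pos hp, splitOnMax_go_zero, find_zero_of_prefix hpre, if_neg (by omega)]
      simp
    · have hpre : ¬ sep <+: (c :: rest) := fun h => hp (List.isPrefixOf_iff_prefix.mpr h)
      rw [if_neg hp, ih f (c :: cur) acc (by simp only [List.length_cons] at hf; omega),
        find_cons_of_not_prefix hpre]
      by_cases hr : PySem.Chars.find rest sep < 0
      · rw [if_pos hr, if_pos hr, if_pos (by omega)]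
        simp
      · have hm0 : 0 ≤ PySem.Chars.find rest sep := by
          have := PySem.Chars.neg_one_le_find rest sep; omega
        rw [if_neg hr, if_neg hr, if_neg (by omega)]
        have ht : (PySem.Chars.find rest sep + 1).toNat = (PySem.Chars.find rest sep).toNat + 1 := by
          omega
        rw [ht, show (PySem.Chars.find rest sep).toNat + 1 + sep.length =
          ((PySem.Chars.find rest sep).toNat + sep.length) + 1 from by omega, List.drop_succ_cons]
        simp [List.take_succ_cons]

theorem splitOnMax_one_find {sep : List Char} (hsep : sep ≠ []) (x : List Char) :
    PySem.Chars.splitOnMax x sep 1 =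
      if PySem.Chars.find x sep < 0 then [x]
      else [x.take (PySem.Chars.find x sep).toNat,
            x.drop ((PySem.Chars.find x sep).toNat + sep.length)] := by
  rw [PySem.Chars.splitOnMax, if_neg (by omega)]
  have h1 : (1 : ℤ).toNat = 1 := rfl
  rw [h1, splitOnMax_go_one hsep x (x.length + 1) [] [] (by omega)]
  split_ifs <;> simp

-- ---- per-segment rendering: A's form of the loop body ----
def renderA (ct x : List Char) : List Char :=
  let endl := PySem.Chars.splitOnMax x [' '] 1
  let xl : Option (List Char) :=
    ['.', ',', ':'].foldl (fun xl eol =>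
      if PySem.Chars.endswith (endl.headD []) [eol] then
        some (settagL (endl.headD []).dropLast ct ++ [eol] ++ [' '] ++
              PySem.Chars.join [' '] endl.tail)
      else xl) none
  let xl2 : List Char :=
    match xl with
    | none => settagL (endl.headD []) ct ++ [' '] ++ PySem.Chars.join [' '] endl.tail
    | some v => v
  xl2

theorem endswith_singleton (w : List Char) (c : Char) :
    PySem.Chars.endswith w [c] = (w.getLast? == some c) := by
  induction w using List.reverseRecOn with
  | nil => simp [PySem.Chars.endswith]
  | append_singleton ys y ih =>
    simp [PySem.Chars.endswith, List.isSuffixOf, List.isPrefixOf, Bool.beq_comm]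

-- the '.,:'-endswith loop of A equals a last-character test, i.e. emitB's branch
theorem eol_fold (ct word rest : List Char) :
    (match (['.', ',', ':'].foldl (fun xl eol =>
        if PySem.Chars.endswith word [eol] then
          some (settagL word.dropLast ct ++ [eol] ++ [' '] ++ rest)
        else xl) none : Option (List Char)) with
      | none => settagL word ct ++ [' '] ++ rest
      | some v => v) = emitB ct word ++ rest := by
  simp only [List.foldl, endswith_singleton, emitB]
  cases hl : word.getLast? with
  | none => simp
  | some c =>
    by_cases h1 : c = '.'
    · subst h1; simp
    · by_cases h2 : c = ','
      · subst h2; simp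
      · by_cases h3 : c = ':'
        · subst h3; simp [h1, h2]
        · simp [h1, h2, h3]

-- B's rendering of the first word of a segment, with an already-collected prefix w
def renderW (ct w x : List Char) : List Char :=
  let sp := PySem.Chars.find x [' ']
  if sp < 0 then emitB ct (w ++ x)
  else emitB ct (w ++ x.take sp.toNat) ++ x.drop (sp.toNat + 1)

-- A's per-segment body equals B's word rendering with empty prefix
theorem renderA_eq_renderW (ct x : List Char) : renderA ct x = renderW ct [] x := by
  have hsp : ([' '] : List Char) ≠ [] := by simp
  simp only [renderA, renderW, splitOnMax_one_find hsp x]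
  by_cases h : PySem.Chars.find x [' '] < 0
  · simp only [if_pos h, List.headD, List.tail, PySem.Chars.join_nil]
    simpa using eol_fold ct x []
  · simp only [if_neg h, List.headD, List.tail, PySem.Chars.join_singleton]
    have harith : (PySem.Chars.find x [' ']).toNat + [' '].length =
        (PySem.Chars.find x [' ']).toNat + 1 := by simp
    rw [harith]
    simpa using eol_fold ct _ _

-- stepping renderW over one non-space character
theorem renderW_cons {c : Char} (ct w h : List Char) (hc : c ≠ ' ') :
    renderW ct w (c :: h) = renderW ct (w ++ [c]) h := by
  have hpre : ¬ ([' '] : List Char) <+: (c :: h) := by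
    intro hp
    rcases List.cons_prefix_cons.mp hp with ⟨hce, -⟩
    exact hc hce.symm
  simp only [renderW, find_cons_of_not_prefix hpre]
  by_cases hr : PySem.Chars.find h [' '] < 0
  · simp [if_pos hr]
  · have hm0 : 0 ≤ PySem.Chars.find h [' '] := by
      have := PySem.Chars.neg_one_le_find h [' ']; omega
    rw [if_neg hr, if_neg (by omega), if_neg hr]
    have ht : (PySem.Chars.find h [' '] + 1).toNat = (PySem.Chars.find h [' ']).toNat + 1 := by
      omega
    rw [ht, List.take_succ_cons, show (PySem.Chars.find h [' ']).toNat + 1 + 1 =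
      ((PySem.Chars.find h [' ']).toNat + 1) + 1 from rfl, List.drop_succ_cons]
    simp

-- renderW on a segment starting with a space
theorem renderW_space (ct w h : List Char) :
    renderW ct w (' ' :: h) = emitB ct w ++ h := by
  have hpre : ([' '] : List Char) <+: (' ' :: h) := by simp
  simp [renderW, find_zero_of_prefix hpre]

-- ---- the state machine computes A's headD/flatMap shape over the split segments ----
theorem btnBrun_spec {tag : List Char} (hsep : tag ≠ []) :
    ∀ n (l : List Char), l.length ≤ n →
      (btnBrun tag l none =
        (PySem.Chars.splitOn l tag).headD [] ++
          ((PySem.Chars.splitOn l tag).tail).flatMap (renderA tag)) ∧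
      (∀ w, btnBrun tag l (some w) =
        renderW tag w ((PySem.Chars.splitOn l tag).headD []) ++
          ((PySem.Chars.splitOn l tag).tail).flatMap (renderA tag)) := by
  have hlen : 1 ≤ tag.length := by
    cases tag with
    | nil => exact absurd rfl hsep
    | cons a t => simp
  intro n
  induction n with
  | zero =>
    intro l hl
    have hnil : l = [] := by cases l with | nil => rfl | cons a t => simp at hl
    subst hnil
    rw [splitOn_nil]
    refine ⟨by rw [btnBrun.eq_def]; simp, fun w => ?_⟩
    rw [btnBrun.eq_def]
    simp [renderW, find_nil' (show ([' '] : List Char) ≠ [] by simp)]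
  | succ n ih =>
    intro l hl
    cases l with
    | nil =>
      rw [splitOn_nil]
      refine ⟨by rw [btnBrun.eq_def]; simp, fun w => ?_⟩
      rw [btnBrun.eq_def]
      simp [renderW, find_nil' (show ([' '] : List Char) ≠ [] by simp)]
    | cons c rest =>
      have hrl : rest.length ≤ n := by simp only [List.length_cons] at hl; omega
      rw [splitOn_cons hsep]
      by_cases hp : tag.isPrefixOf (c :: rest)
      · rw [if_pos hp]
        have hdl : ((c :: rest).drop tag.length).length ≤ n := by
          simp only [List.length_drop, List.length_cons]
          simp only [List.length_cons] at hl
          omega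
        have hd := (ih _ hdl).2 []
        have hflat : btnBrun tag ((c :: rest).drop tag.length) (some []) =
            (PySem.Chars.splitOn ((c :: rest).drop tag.length) tag).flatMap (renderA tag) := by
          rw [hd]
          cases hsp : PySem.Chars.splitOn ((c :: rest).drop tag.length) tag with
          | nil => exact absurd hsp (splitOn_ne_nil _ _)
          | cons h' t' =>
            simp [renderA_eq_renderW]
        constructor
        · rw [btnBrun.eq_def]
          dsimp only
          rw [dif_pos ⟨hsep, hp⟩, hflat]
          simp
        · intro w
          rw [btnBrun.eq_def]
          dsimp only
          rw [dif_pos ⟨hsep, hp⟩, hflat]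
          have hrw : renderW tag w [] = emitB tag w := by
            simp [renderW, find_nil' (show ([' '] : List Char) ≠ [] by simp)]
          simp [hrw]
      · rw [if_neg hp]
        cases hsp : PySem.Chars.splitOn rest tag with
        | nil => exact absurd hsp (splitOn_ne_nil _ _)
        | cons h' t' =>
          have h1 := (ih rest hrl).1
          have h2 := (ih rest hrl).2
          rw [hsp] at h1 h2
          simp only [List.headD_cons, List.tail_cons] at h1 h2
          constructor
          · rw [btnBrun.eq_def]
            dsimp only
            rw [dif_neg (show ¬(tag ≠ [] ∧ tag.isPrefixOf (c :: rest)) by rintro ⟨-, hq⟩; exact hp hq)]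
            simp only [modHead, List.singleton_append, List.headD_cons, List.tail_cons]
            rw [h1]
            simp
          · intro w
            rw [btnBrun.eq_def]
            dsimp only
            rw [dif_neg (show ¬(tag ≠ [] ∧ tag.isPrefixOf (c :: rest)) by rintro ⟨-, hq⟩; exact hp hq)]
            simp only [modHead, List.singleton_append, List.headD_cons, List.tail_cons]
            by_cases hc : c = ' '
            · subst hc
              rw [if_pos rfl, h1, renderW_space]
              simp
            · rw [if_neg hc, h2 (w ++ [c]), renderW_cons tag w h' hc]

-- A's foldl over the segments, as headD ++ flatMap
theorem btnAL_eq (cs ct : List Char) (hsep : ct ≠ []) :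
    btnAL cs ct = (PySem.Chars.splitOn cs ct).headD [] ++
      ((PySem.Chars.splitOn cs ct).tail).flatMap (renderA ct) := by
  have hsome : PySem.Chars.split? cs ct = some (PySem.Chars.splitOn cs ct) := by
    rw [PySem.Chars.split?, if_neg (by simpa using hsep)]
  have hred : btnAL cs ct = List.foldl (fun buf x => buf ++ renderA ct x)
      ((PySem.Chars.splitOn cs ct).headD []) (PySem.Chars.splitOn cs ct).tail := by
    rw [btnAL, hsome]
    rfl
  rw [hred, PySem.List.foldl_append_eq_flatMap]

-- ===== VERDICT (by name: the statement is the Claim_ definition above) =====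
theorem btn_py_spec : Claim_equal_btn_py := by
  intro s tag _ hpre
  unfold Spec_btn_py btn_py btn_py_alt
  have hsep : tag.toList ≠ [] := by simpa using hpre.1
  rw [btnAL_eq s.toList tag.toList hsep,
    ← (btnBrun_spec hsep s.toList.length s.toList le_rfl).1]
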